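-- pv_equiv track=rewrite | github.com/kimnamjun/ITWILL-Python2 | test/예산.py | solution
-- ===== SOURCE A (Python) =====
-- def solution(budgets, M):
--     budgets.sort()
--     left = 0
--     right = budgets[-1]
--
--     while left <= right:
--         mid = (left + right) // 2
--         budgets2 = [x if x < mid else mid for x in budgets]
--         total = sum(budgets2)
--
--         if total == M:
--             return mid
--         elif total < M:
--             left = mid + 1
--         else:
--             right = mid - 1
--     return right
-- ===== SOURCE B (Python) =====
-- def _bisect_left(a, x):
--     lo, hi = 0, len(a)
--     while lo < hi:
--         mid = (lo + hi) // 2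
--         if a[mid] < x:
--             lo = mid + 1
--         else:
--             hi = mid
--     return lo
--
--
-- def solution(budgets, M):
--     # Note: like the original, this sorts `budgets` in place (same side effect).
--     budgets.sort()
--     n = len(budgets)
--     prefix = [0]
--     s = 0
--     for x in budgets:
--         s += x
--         prefix.append(s)
--
--     left = 0
--     right = budgets[-1]
--     while left <= right:
--         mid = (left + right) // 2
--         k = _bisect_left(budgets, mid)
--         total = prefix[k] + mid * (n - k)
--         if total == M:
--             return mid
--         elif total < M:
--             left = mid + 1
--         else:
--             right = mid - 1
--     return right
-- ===== Notes on version B (the rewrite author's own statement) =====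
-- stated objective: faster
-- what changed: Each binary-search step now computes the capped sum in O(log n) from a precomputed prefix-sum array plus a hand-written bisect on the sorted list, instead of rebuilding and summing an n-element capped list per step.
import Mathlib
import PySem

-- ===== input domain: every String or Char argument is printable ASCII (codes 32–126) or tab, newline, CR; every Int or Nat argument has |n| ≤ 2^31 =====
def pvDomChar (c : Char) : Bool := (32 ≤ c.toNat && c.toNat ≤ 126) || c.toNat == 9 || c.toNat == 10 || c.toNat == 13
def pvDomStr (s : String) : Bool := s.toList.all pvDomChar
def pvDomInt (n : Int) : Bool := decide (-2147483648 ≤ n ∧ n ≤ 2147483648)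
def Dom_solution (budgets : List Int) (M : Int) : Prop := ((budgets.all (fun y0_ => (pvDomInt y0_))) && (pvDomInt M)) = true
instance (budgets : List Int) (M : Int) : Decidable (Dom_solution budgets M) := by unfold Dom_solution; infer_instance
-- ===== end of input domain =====

-- B replaces A's per-step O(n) capped-list rebuild by a precomputed prefix-sum array and a bisect
-- (objective: faster). Both Pythons sort `budgets` in place (same side effect); the equivalence
-- proved here is about the return value.

-- ===== PORT A =====
-- the while-loop of A: state (left, right); terminates because the interval shrinks
def solutionLoopA (bs : List Int) (M : Int) (left right : Int) : Int :=
  if h : left ≤ right then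
    let mid := PySem.Int.floordiv (left + right) 2
    let total := (bs.map (fun x => if x < mid then x else mid)).sum
    if total = M then mid
    else if total < M then solutionLoopA bs M (mid + 1) right
    else solutionLoopA bs M left (mid - 1)
  else right
termination_by (right - left + 1).toNat
decreasing_by
  · have := PySem.Int.floordiv_two_mid_bounds h; omega
  · have := PySem.Int.floordiv_two_mid_bounds h; omega

def solution (budgets : List Int) (M : Int) : Int :=
  let bs := PySem.List.sorted budgets (fun x => x) false
  -- budgets[-1] raises IndexError on []; that input is excluded by Pre_, so the total default form is exact
  solutionLoopA bs M 0 (PySem.List.pyGetD bs (-1) 0)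

-- ===== PORT B =====
-- hand-written _bisect_left of Source B; lo and hi stay non-negative throughout, so Nat with Nat
-- division transcribes Python's (lo + hi) // 2 exactly; a[mid] is always in range (lo ≤ mid < hi ≤ len)
def bisectLeftB (a : List Int) (x : Int) (lo hi : Nat) : Nat :=
  if lo < hi then
    let mid := (lo + hi) / 2
    if a.getD mid 0 < x then bisectLeftB a x (mid + 1) hi else bisectLeftB a x lo mid
  else lo
termination_by hi - lo
decreasing_by all_goals omega

-- the prefix-building for-loop of Source B: state (s, prefix)
def prefixLoopB : List Int → Int → List Int → List Int
  | [], _, P => P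
  | x :: xs, s, P => prefixLoopB xs (s + x) (P ++ [s + x])

-- the while-loop of B; prefix[k] is always in range (k ≤ n < len(prefix))
def solutionLoopB (bs P : List Int) (M : Int) (left right : Int) : Int :=
  if h : left ≤ right then
    let mid := PySem.Int.floordiv (left + right) 2
    let k := bisectLeftB bs mid 0 bs.length
    let total := P.getD k 0 + mid * ((bs.length : Int) - (k : Int))
    if total = M then mid
    else if total < M then solutionLoopB bs P M (mid + 1) right
    else solutionLoopB bs P M left (mid - 1)
  else right
termination_by (right - left + 1).toNat
decreasing_by
  · have := PySem.Int.floordiv_two_mid_bounds h; omega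
  · have := PySem.Int.floordiv_two_mid_bounds h; omega

def solution_alt (budgets : List Int) (M : Int) : Int :=
  let bs := PySem.List.sorted budgets (fun x => x) false
  let P := prefixLoopB bs 0 [0]
  solutionLoopB bs P M 0 (PySem.List.pyGetD bs (-1) 0)

-- ===== PRECONDITION & SPEC =====
-- A evaluates budgets[-1]: on the empty list it raises IndexError (and so does B); Pre_ excludes only that.
def Pre_solution (budgets : List Int) (M : Int) : Prop := budgets ≠ []
instance (budgets : List Int) (M : Int) : Decidable (Pre_solution budgets M) := by unfold Pre_solution; infer_instance
def pvWitness_solution : List Int × Int := ([120, 110, 140, 150], 485)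

def Spec_solution (budgets : List Int) (M : Int) (out : Int) : Prop := out = solution_alt budgets M
instance (budgets : List Int) (M : Int) (out : Int) : Decidable (Spec_solution budgets M out) := by unfold Spec_solution; infer_instance

-- ===== CLAIM (what is proved, stated in full; the proofs are below) =====
def Claim_equal_solution : Prop := ∀ (budgets : List Int) (M : Int), Dom_solution budgets M → Pre_solution budgets M → Spec_solution budgets M (solution budgets M)

-- ===== LEMMAS AND PROOFS =====

-- sortedness between indices, in getD form
theorem getD_mono (a : List Int) (hs : a.Pairwise (· ≤ ·)) (i j : Nat)
    (hij : i ≤ j) (hj : j < a.length) : a.getD i 0 ≤ a.getD j 0 := by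
  rcases Nat.eq_or_lt_of_le hij with rfl | h
  · exact le_refl _
  · rw [List.getD_eq_getElem _ _ (by omega), List.getD_eq_getElem _ _ hj]
    exact List.pairwise_iff_getElem.mp hs i j (by omega) hj h

-- bisect_left invariant: on a (≤)-sorted list the result k separates the elements < x from those ≥ x
theorem bisectLeftB_inv (a : List Int) (x : Int) (hs : a.Pairwise (· ≤ ·)) :
    ∀ lo hi, lo ≤ hi → hi ≤ a.length →
      (∀ j, j < lo → a.getD j 0 < x) → (∀ j, hi ≤ j → j < a.length → x ≤ a.getD j 0) →
      (bisectLeftB a x lo hi ≤ a.length ∧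
        (∀ j, j < bisectLeftB a x lo hi → a.getD j 0 < x) ∧
        (∀ j, bisectLeftB a x lo hi ≤ j → j < a.length → x ≤ a.getD j 0)) := by
  intro lo hi
  induction h : hi - lo using Nat.strong_induction_on generalizing lo hi with
  | _ n ih =>
  intro hlh hhl hlt hge
  rw [bisectLeftB]
  by_cases hc : lo < hi
  · simp only [if_pos hc]
    set mid := (lo + hi) / 2 with hmid
    have hm1 : lo ≤ mid := by omega
    have hm2 : mid < hi := by omega
    by_cases hb : a.getD mid 0 < x
    · simp only [if_pos hb]
      exact ih (hi - (mid + 1)) (by omega) (mid + 1) hi rfl (by omega) hhl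
        (fun j hj => lt_of_le_of_lt (getD_mono a hs j mid (by omega) (by omega)) hb) hge
    · simp only [if_neg hb]
      exact ih (mid - lo) (by omega) lo mid rfl (by omega) (by omega) hlt
        (fun j hj hjl => le_trans (not_lt.mp hb) (getD_mono a hs mid j hj hjl))
  · simp only [if_neg hc]
    exact ⟨by omega, hlt, fun j hj hjl => hge j (by omega) hjl⟩

-- the capped sum of A's comprehension in closed form, from the separation at k
theorem cappedSum_eq (x : Int) : ∀ (a : List Int) (k : Nat), k ≤ a.length →
    (∀ j, j < k → a.getD j 0 < x) → (∀ j, k ≤ j → j < a.length → x ≤ a.getD j 0) →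
    (a.map (fun y => if y < x then y else x)).sum
      = (a.take k).sum + x * ((a.length : Int) - (k : Int)) := by
  intro a
  induction a with
  | nil => intro k hk _ _; simp at hk; subst hk; simp
  | cons b t ih =>
    intro k hk hlt hge
    cases k with
    | zero =>
      have hb : ¬ b < x := by have := hge 0 (by omega) (by simp); simp [List.getD] at this; omega
      have := ih 0 (by omega) (by omega) (fun j _ hj => by
        have := hge (j + 1) (by omega) (by simpa using Nat.succ_lt_succ hj)
        simpa [List.getD_cons_succ] using this)
      simp only [List.map_cons, List.sum_cons, if_neg hb, this]
      simp [List.length_cons]; ring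
    | succ k' =>
      have hb : b < x := by have := hlt 0 (by omega); simpa [List.getD] using this
      have := ih k' (by simpa using Nat.succ_le_succ_iff.mp hk)
        (fun j hj => by have := hlt (j + 1) (by omega); simpa [List.getD_cons_succ] using this)
        (fun j h1 h2 => by
          have := hge (j + 1) (by omega) (by simpa using Nat.succ_lt_succ h2)
          simpa [List.getD_cons_succ] using this)
      simp only [List.map_cons, List.sum_cons, if_pos hb, this, List.take_succ_cons]
      simp [List.length_cons]; ring

-- the prefix loop builds exactly the list of prefix sums
theorem prefixLoopB_eq : ∀ (a : List Int) (s : Int) (P : List Int),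
    prefixLoopB a s P = P ++ (List.range a.length).map (fun i => s + (a.take (i + 1)).sum) := by
  intro a
  induction a with
  | nil => intro s P; simp [prefixLoopB]
  | cons x xs ih =>
    intro s P
    rw [prefixLoopB, ih]
    simp [List.range_succ_eq_map, List.map_map, List.append_assoc, Function.comp, add_assoc]

theorem prefixLoopB_getD (a : List Int) (k : Nat) (hk : k ≤ a.length) :
    (prefixLoopB a 0 [0]).getD k 0 = (a.take k).sum := by
  rw [prefixLoopB_eq]
  cases k with
  | zero => simp
  | succ j =>
    have hj : j < a.length := by omega
    rw [List.cons_append, List.nil_append, List.getD_cons_succ]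
    rw [List.getD_eq_getElem _ _ (by simpa using hj)]
    simp [hj]

-- per step: A's total equals B's total on a sorted list
theorem totals_eq (bs : List Int) (hs : bs.Pairwise (· ≤ ·)) (mid : Int) :
    (bs.map (fun x => if x < mid then x else mid)).sum
      = (prefixLoopB bs 0 [0]).getD (bisectLeftB bs mid 0 bs.length) 0
        + mid * ((bs.length : Int) - (bisectLeftB bs mid 0 bs.length : Int)) := by
  obtain ⟨h1, h2, h3⟩ := bisectLeftB_inv bs mid hs 0 bs.length (by omega) (le_refl _)
    (by omega) (by omega)
  rw [cappedSum_eq mid bs _ h1 h2 h3, prefixLoopB_getD bs _ h1]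

-- the two while-loops agree step for step
theorem loops_eq (bs : List Int) (hs : bs.Pairwise (· ≤ ·)) (M : Int) :
    ∀ left right : Int, solutionLoopA bs M left right = solutionLoopB bs (prefixLoopB bs 0 [0]) M left right := by
  intro left right
  induction hn : (right - left + 1).toNat using Nat.strong_induction_on generalizing left right with
  | _ n ih =>
  rw [solutionLoopA, solutionLoopB]
  by_cases h : left ≤ right
  · simp only [dif_pos h]
    have hmb := PySem.Int.floordiv_two_mid_bounds h
    rw [← totals_eq bs hs (PySem.Int.floordiv (left + right) 2)]
    split_ifs with h1 h2
    · rfl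
    · exact ih _ (by omega) _ _ rfl
    · exact ih _ (by omega) _ _ rfl
  · simp [dif_neg h]

-- ===== VERDICT (by name: the statement is the Claim_ definition above) =====
theorem solution_spec : Claim_equal_solution := by
  intro budgets M _ _
  unfold Spec_solution solution solution_alt
  exact loops_eq _ (by simpa using PySem.List.sorted_pairwise budgets (fun x => x)) M _ _
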